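-- pv_equiv track=rewrite | github.com/abelGebel/abelgebel-Ingenieria-Informatica | Desarrollo sistematico de programas/Programacion iterativa-recursiva/01.py | sumarListaRecursivo
-- ===== SOURCE A (Python) =====
-- def sumarListaRecursivo(vector,N):
--     if N==-1:
--         return 0
--     else:
--         if vector[N]%2==0:
--             return vector[N]+sumarListaRecursivo(vector,N-1)
--         else:
--             return sumarListaRecursivo(vector,N-1)
-- ===== SOURCE B (Python) =====
-- def sumarListaRecursivo(vector, N):
--     # Iterative re-implementation: accumulator loop walking the same indices
--     # N, N-1, ..., 0 instead of recursion.
--     total = 0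
--     for i in range(N, -1, -1):
--         if vector[i] % 2 == 0:
--             total += vector[i]
--     return total
-- ===== Notes on version B (the rewrite author's own statement) =====
-- stated objective: idiomatic
-- what changed: Replaced the recursion on N with an iterative accumulator loop over range(N, -1, -1); same index walk, no call stack.
import Mathlib
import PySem

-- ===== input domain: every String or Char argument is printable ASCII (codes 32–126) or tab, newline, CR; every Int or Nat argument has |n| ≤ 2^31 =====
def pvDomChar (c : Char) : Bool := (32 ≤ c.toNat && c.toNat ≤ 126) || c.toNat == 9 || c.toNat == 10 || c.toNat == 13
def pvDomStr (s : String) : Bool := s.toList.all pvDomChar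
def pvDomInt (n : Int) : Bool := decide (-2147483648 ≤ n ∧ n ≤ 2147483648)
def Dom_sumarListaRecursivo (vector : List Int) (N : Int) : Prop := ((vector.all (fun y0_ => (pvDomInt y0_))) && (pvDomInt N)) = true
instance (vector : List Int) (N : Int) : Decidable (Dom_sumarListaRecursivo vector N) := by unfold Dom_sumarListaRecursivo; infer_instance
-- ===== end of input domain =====

-- B replaces A's recursion on N by an iterative accumulator loop over the same indices (idiomatic; same cost).


-- ===== PORT A =====
-- A recurses on N down to the sentinel -1; we transcribe it with the recursion depth
-- (N+1).toNat as the structural Nat argument (pure totality encoding; for N < -1,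
-- where Python raises IndexError, the port returns 0).
def sumarAuxA (vector : List Int) : Nat → Int
  | 0 => 0
  | n + 1 =>
    match PySem.List.pyGet? vector (n : Int) with
    | none => 0  -- vector[N] raises IndexError here; excluded by Pre_
    | some v => if PySem.Int.mod v 2 = 0 then v + sumarAuxA vector n else sumarAuxA vector n

def sumarListaRecursivo (vector : List Int) (N : Int) : Int :=
  if N < -1 then 0 else sumarAuxA vector (N + 1).toNat

-- ===== PORT B =====
def sumarListaRecursivo_alt (vector : List Int) (N : Int) : Int :=
  (PySem.List.pyRange N (-1) (-1)).foldl
    (fun total i =>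
      match PySem.List.pyGet? vector i with
      | none => total  -- vector[i] raises IndexError here; excluded by Pre_
      | some v => if PySem.Int.mod v 2 = 0 then total + v else total) 0

-- ===== PRECONDITION & SPEC =====
-- Pre_ excludes exactly the inputs on which Python A raises IndexError: N ≥ len(vector), and N < -1
-- (where the recursion walks through ever more negative indices past -len).
def Pre_sumarListaRecursivo (vector : List Int) (N : Int) : Prop :=
  -1 ≤ N ∧ N < vector.length
instance (vector : List Int) (N : Int) : Decidable (Pre_sumarListaRecursivo vector N) := by
  unfold Pre_sumarListaRecursivo; infer_instance

def pvWitness_sumarListaRecursivo : List Int × Int := ([2, 3, 4], 2)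

def Spec_sumarListaRecursivo (vector : List Int) (N : Int) (out : Int) : Prop := out = sumarListaRecursivo_alt vector N
instance (vector : List Int) (N : Int) (out : Int) : Decidable (Spec_sumarListaRecursivo vector N out) := by unfold Spec_sumarListaRecursivo; infer_instance

-- ===== CLAIM (what is proved, stated in full; the proofs are below) =====
def Claim_equal_sumarListaRecursivo : Prop := ∀ (vector : List Int) (N : Int), Dom_sumarListaRecursivo vector N → Pre_sumarListaRecursivo vector N → Spec_sumarListaRecursivo vector N (sumarListaRecursivo vector N)

-- ===== LEMMAS AND PROOFS =====

-- B's loop from index n-1 down to 0, started at accumulator t, is t plus A's recursion at depth n.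
theorem sumarAux_eq_foldl (vector : List Int) (n : Nat) (h : (n : Int) ≤ vector.length) (t : Int) :
    (PySem.List.pyRange ((n : Int) - 1) (-1) (-1)).foldl
      (fun total i =>
        match PySem.List.pyGet? vector i with
        | none => total
        | some v => if PySem.Int.mod v 2 = 0 then total + v else total) t
    = t + sumarAuxA vector n := by
  induction n generalizing t with
  | zero =>
    rw [PySem.List.pyRange_neg_one_eq_nil (by norm_num)]
    simp [sumarAuxA]
  | succ n ih =>
    have hcons : PySem.List.pyRange (((n : Nat) + 1 : Int) - 1) (-1) (-1)
        = ((n : Int)) :: PySem.List.pyRange ((n : Int) - 1) (-1) (-1) := by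
      have he : (((n : Nat) + 1 : Int) - 1) = (n : Int) := by push_cast; ring
      rw [he, PySem.List.pyRange_neg_one_cons (by omega)]
    simp only [Nat.cast_add, Nat.cast_one]
    rw [hcons]
    have hn : n < vector.length := by omega
    have hget : PySem.List.pyGet? vector (n : Int) = some vector[n] := by
      rw [PySem.List.pyGet?_natCast]; exact List.getElem?_eq_getElem hn
    simp only [List.foldl_cons, hget, sumarAuxA]
    by_cases hm : PySem.Int.mod vector[n] 2 = 0
    · simp only [hm, if_true]
      rw [ih (by omega) (t + vector[n])]
      ring
    · simp only [hm, if_false]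
      rw [ih (by omega) t]

-- ===== VERDICT (by name: the statement is the Claim_ definition above) =====
theorem sumarListaRecursivo_spec : Claim_equal_sumarListaRecursivo := by
  intro vector N _ hpre
  obtain ⟨h1, h2⟩ := hpre
  unfold Spec_sumarListaRecursivo sumarListaRecursivo sumarListaRecursivo_alt
  rw [if_neg (by omega)]
  have hn : ((N + 1).toNat : Int) = N + 1 := Int.toNat_of_nonneg (by omega)
  have := sumarAux_eq_foldl vector (N + 1).toNat (by omega) 0
  rw [hn] at this
  have hN : N + 1 - 1 = N := by ring
  rw [hN] at this
  rw [this, zero_add]
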